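-- pv_equiv track=rewrite | github.com/Shayan-Bathaee/LeetCode-Problems | Hard/2127. Maximum Employees Invited/solution1.py | sumAllMutualChains
-- ===== SOURCE A (Python) =====
-- def sumAllMutualChains(mutualFavorites, favorite):
--     # create a dictionary to store the longest chain for each of the nodes
--     longestChains = dict()
--     for node in mutualFavorites:
--         longestChains[node] = 0
--
--     # start at each node and fill in the dictionary
--     for i in range(len(favorite)):
--         visitedIndexes = []
--         visiting = i
--         while visiting not in visitedIndexes and visiting not in longestChains:
--             visitedIndexes.append(visiting)
--             visiting = favorite[visiting]
--         if visiting in longestChains: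
--             if len(visitedIndexes) + 1 > longestChains[visiting]:
--                 longestChains[visiting] = len(visitedIndexes) + 1
--
--     # add up all the largest chains
--     mutualChainSum = 0
--     for node in mutualFavorites:
--         mutualChainSum += longestChains[node]
--
--     return mutualChainSum
-- ===== SOURCE B (Python) =====
-- def sumAllMutualChains(mutualFavorites, favorite):
--     # O(n): one memoized pass computing, for every start index, the mutual node its
--     # walk first reaches and the number of steps; then one max/sum aggregation.
--     mutual = set(mutualFavorites)
--     n = len(favorite)
--     memo = {}  # index -> (mutual target, steps to it) or None if the walk never reaches a mutual node
--     for i in range(n):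
--         path = []
--         onPath = set()
--         v = i
--         while v not in memo and v not in mutual and v not in onPath:
--             onPath.add(v)
--             path.append(v)
--             v = favorite[v]
--         if v in mutual:
--             memo[v] = (v, 0)
--         res = memo.get(v)  # None when the walk closed a mutual-free cycle
--         if res is None:
--             for u in path:
--                 memo[u] = None
--         else:
--             m, d = res
--             for u in reversed(path):
--                 d += 1
--                 memo[u] = (m, d)
--     best = dict.fromkeys(mutual, 0)
--     for i in range(n):
--         r = memo[i]
--         if r is not None:
--             m, d = r
--             if d + 1 > best[m]:
--                 best[m] = d + 1
--     return sum(best[node] for node in mutualFavorites)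
-- ===== Notes on version B (the rewrite author's own statement) =====
-- stated objective: alternative
-- what changed: A re-walks the graph from every start index independently; B walks each index once, memoizing (first mutual node reached, distance) for every node of a walked path and stopping later walks at memoized nodes, then aggregates the per-start maxima in a separate pass.
-- outside the precondition, e.g. on sumAllMutualChains({0, 1}, [-1, 9]): A returns 2, B returns 2
import Mathlib
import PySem

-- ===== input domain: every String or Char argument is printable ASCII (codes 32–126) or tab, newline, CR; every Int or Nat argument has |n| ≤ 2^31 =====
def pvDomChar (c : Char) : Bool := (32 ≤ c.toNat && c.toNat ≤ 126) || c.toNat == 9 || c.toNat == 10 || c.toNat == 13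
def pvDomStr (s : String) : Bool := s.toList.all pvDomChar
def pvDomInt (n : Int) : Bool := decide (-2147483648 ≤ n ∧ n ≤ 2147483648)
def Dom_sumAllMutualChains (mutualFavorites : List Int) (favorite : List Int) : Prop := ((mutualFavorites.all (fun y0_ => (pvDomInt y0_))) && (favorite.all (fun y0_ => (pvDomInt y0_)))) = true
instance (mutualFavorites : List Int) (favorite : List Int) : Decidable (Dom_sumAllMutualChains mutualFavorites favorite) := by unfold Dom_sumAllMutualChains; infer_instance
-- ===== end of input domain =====

-- B replaces A's independent per-start re-walks by one memoized pass over the functional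
-- graph (each walk stops at already-resolved nodes and back-fills its whole path), then
-- aggregates the per-start results in a second loop; same return value on all of Pre_.

-- ===== PORT A =====
-- the inner `while visiting not in visitedIndexes and visiting not in longestChains:` loop;
-- fuel 2*len(favorite)+2 always suffices on Pre_ (walkA_go below): the visited list is
-- duplicate-free and all its members lie in [-n, n)
def walkA (favorite : List Int) (lc : PySem.Dict Int Int) :
    Nat → List Int → Int → List Int × Int
  | 0, vis, v => (vis, v)
  | fuel+1, vis, v =>
      if vis.contains v = false ∧ lc.contains v = false then
        walkA favorite lc fuel (vis ++ [v]) (PySem.List.pyGetD favorite v 0)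
      else (vis, v)

def sumAllMutualChains (mutualFavorites : List Int) (favorite : List Int) : Int :=
  -- longestChains[node] = 0 for node in mutualFavorites
  let lc0 : PySem.Dict Int Int :=
    mutualFavorites.foldl (fun d node => d.insert node 0) PySem.Dict.empty
  let n := favorite.length
  -- for i in range(len(favorite)): walk from i, then possibly raise longestChains[visiting]
  let lc := (List.range n).foldl (fun lc (i : Nat) =>
    let w := walkA favorite lc (2 * n + 2) [] (i : Int)
    if lc.contains w.2 then
      if (w.1.length : Int) + 1 > lc.getD w.2 0 then lc.insert w.2 ((w.1.length : Int) + 1)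
      else lc
    else lc) lc0
  -- mutualChainSum += longestChains[node]
  mutualFavorites.foldl (fun s node => s + lc.getD node 0) 0

-- ===== PORT B =====
-- the `while v not in memo and v not in mutual and v not in onPath:` loop of Source B
def walkB (favorite : List Int) (memo : PySem.Dict Int (Option (Int × Int)))
    (mset : PySem.Set Int) : Nat → List Int → PySem.Set Int → Int → List Int × Int
  | 0, path, _, v => (path, v)
  | fuel+1, path, onPath, v =>
      if memo.contains v = false ∧ PySem.Set.contains mset v = false
          ∧ PySem.Set.contains onPath v = false then
        walkB favorite memo mset fuel (path ++ [v]) (PySem.Set.add onPath v)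
          (PySem.List.pyGetD favorite v 0)
      else (path, v)

def sumAllMutualChains_alt (mutualFavorites : List Int) (favorite : List Int) : Int :=
  let mset : PySem.Set Int := PySem.Set.ofList mutualFavorites
  let n := favorite.length
  -- memoized pass: every index is resolved once, walks stop at memoized nodes
  let memo : PySem.Dict Int (Option (Int × Int)) :=
    (List.range n).foldl (fun memo (i : Nat) =>
      let w := walkB favorite memo mset (2 * n + 2) [] PySem.Set.empty (i : Int)
      let memo1 := if PySem.Set.contains mset w.2 then memo.insert w.2 (some (w.2, 0)) else memo
      match memo1.getD w.2 none with
      | none => w.1.foldl (fun m u => m.insert u none) memo1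
      | some md =>
          (w.1.reverse.foldl (fun (st : PySem.Dict Int (Option (Int × Int)) × Int) u =>
            (st.1.insert u (some (md.1, st.2 + 1)), st.2 + 1)) (memo1, md.2)).1
    ) PySem.Dict.empty
  -- best[m] = max over starts of (steps + 1)
  let best : PySem.Dict Int Int :=
    (List.range n).foldl (fun best (i : Nat) =>
      match memo.getD (i : Int) none with
      | none => best
      | some md => if md.2 + 1 > best.getD md.1 0 then best.insert md.1 (md.2 + 1) else best)
      (mset.foldl (fun d m => d.insert m 0) PySem.Dict.empty)
  mutualFavorites.foldl (fun s node => s + best.getD node 0) 0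

-- ===== PRECONDITION & SPEC =====
-- Pre_ admits every favorite entry that is a valid Python index, an entry that is itself a
-- mutual favorite (every walk stops on it before indexing with it), and an out-of-range entry
-- at a position both of whose index aliases j and j-n are mutual favorites or whose negative
-- alias j-n can never be visited (it is mutual or not a favorite value); the excluded inputs
-- are ones where A raises IndexError, except a residual corner (an out-of-range entry at a
-- mutual index whose negative alias happens never to be walked — exact raising depends on
-- reachability and has no closed form) where A returns and B returns the same value.
def Pre_sumAllMutualChains (mutualFavorites : List Int) (favorite : List Int) : Prop :=
  ∀ (j : Nat), (hj : j < favorite.length) →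
    (-(favorite.length : Int) ≤ favorite[j] ∧ favorite[j] < favorite.length) ∨
    favorite[j] ∈ mutualFavorites ∨
    ((j : Int) ∈ mutualFavorites ∧
      (((j : Int) - favorite.length) ∈ mutualFavorites ∨ ((j : Int) - favorite.length) ∉ favorite))

instance (mutualFavorites : List Int) (favorite : List Int) :
    Decidable (Pre_sumAllMutualChains mutualFavorites favorite) := by
  unfold Pre_sumAllMutualChains; infer_instance

def pvWitness_sumAllMutualChains : List Int × List Int := ([0, 3], [1, 0, 1])

def Spec_sumAllMutualChains (mutualFavorites : List Int) (favorite : List Int) (out : Int) : Prop :=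
  out = sumAllMutualChains_alt mutualFavorites favorite

instance (mutualFavorites : List Int) (favorite : List Int) (out : Int) :
    Decidable (Spec_sumAllMutualChains mutualFavorites favorite out) := by
  unfold Spec_sumAllMutualChains; infer_instance

-- ===== CLAIM (what is proved, stated in full; the proofs are below) =====
def Claim_equal_sumAllMutualChains : Prop := ∀ (mutualFavorites : List Int) (favorite : List Int), Dom_sumAllMutualChains mutualFavorites favorite → Pre_sumAllMutualChains mutualFavorites favorite → Spec_sumAllMutualChains mutualFavorites favorite (sumAllMutualChains mutualFavorites favorite)

-- ===== LEMMAS AND PROOFS =====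

-- Both programs walk the same successor function; everything below characterises a walk
-- from i by the trajectory i, favorite[i], favorite[favorite[i]], …
def mcStep (favorite : List Int) (v : Int) : Int := PySem.List.pyGetD favorite v 0

def mcTraj (favorite : List Int) (i : Int) (k : Nat) : Int := (mcStep favorite)^[k] i

-- the walk from i first meets a mutual favorite after exactly k steps
def mcReaches (MF favorite : List Int) (i : Int) (k : Nat) : Prop :=
  mcTraj favorite i k ∈ MF ∧ ∀ j < k, mcTraj favorite i j ∉ MF

-- the walk from i never meets a mutual favorite
def mcDead (MF favorite : List Int) (i : Int) : Prop := ∀ k, mcTraj favorite i k ∉ MF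

-- what a memo entry / per-start result r for start i means
def mcMatches (MF favorite : List Int) (i : Int) : Option (Int × Int) → Prop
  | none => mcDead MF favorite i
  | some md => ∃ k : Nat, md.2 = (k : Int) ∧ mcReaches MF favorite i k ∧ md.1 = mcTraj favorite i k

lemma mcTraj_zero (favorite : List Int) (i : Int) : mcTraj favorite i 0 = i := rfl

lemma mcTraj_succ (favorite : List Int) (i : Int) (k : Nat) :
    mcTraj favorite i (k+1) = mcStep favorite (mcTraj favorite i k) :=
  Function.iterate_succ_apply' _ _ _

lemma mcTraj_add (favorite : List Int) (i : Int) (t s : Nat) :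
    mcTraj favorite (mcTraj favorite i t) s = mcTraj favorite i (t + s) := by
  unfold mcTraj
  rw [Nat.add_comm, Function.iterate_add_apply]

lemma mcStep_range (MF favorite : List Int)
    (hPre : Pre_sumAllMutualChains MF favorite)
    (u : Int) (hu1 : -(favorite.length : Int) ≤ u) (hu2 : u < favorite.length)
    (humut : u ∉ MF) (humem : 0 ≤ u ∨ u ∈ favorite) :
    (-(favorite.length : Int) ≤ mcStep favorite u ∧ mcStep favorite u < favorite.length) ∨
      mcStep favorite u ∈ MF := by
  unfold Pre_sumAllMutualChains at hPre
  by_cases h0 : 0 ≤ u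
  · have hj : u.toNat < favorite.length := by omega
    have hstep : mcStep favorite u = favorite[u.toNat] := by
      unfold mcStep
      exact PySem.List.pyGetD_eq_getElem favorite 0 h0 (by exact_mod_cast hu2)
    rcases hPre u.toNat hj with h | h | ⟨hm, -⟩
    · exact Or.inl (hstep ▸ h)
    · exact Or.inr (hstep ▸ h)
    · have : (u.toNat : Int) = u := by omega
      rw [this] at hm
      exact absurd hm humut
  · have humem' : u ∈ favorite := by
      rcases humem with h | h
      · exact absurd h h0
      · exact h
    have hk0 : 0 < (-u).toNat := by omega
    have hkn : (-u).toNat ≤ favorite.length := by omega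
    have hstep := PySem.List.pyGetD_neg_natCast favorite ((-u).toNat) 0 hk0 hkn
    rw [show -(((-u).toNat : Int)) = u from by omega] at hstep
    rw [show PySem.List.pyGetD favorite u 0 = mcStep favorite u from rfl] at hstep
    have hj : favorite.length - (-u).toNat < favorite.length := by omega
    rcases hPre (favorite.length - (-u).toNat) hj with h | h | ⟨-, halias⟩
    · exact Or.inl (hstep ▸ h)
    · exact Or.inr (hstep ▸ h)
    · have hcast : ((favorite.length - (-u).toNat : Nat) : Int) - favorite.length = u := by omega
      rw [hcast] at halias
      rcases halias with h | h
      · exact absurd h humut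
      · exact absurd humem' h

-- if the walk has met no mutual favorite before step t, the node at step t is a valid
-- Python index or is itself a mutual favorite
lemma mcTraj_range' (MF favorite : List Int)
    (hPre : Pre_sumAllMutualChains MF favorite)
    (i : Int) (hi0 : 0 ≤ i) (hin : i < favorite.length) :
    ∀ (t : Nat), (∀ j < t, mcTraj favorite i j ∉ MF) →
      (-(favorite.length : Int) ≤ mcTraj favorite i t ∧ mcTraj favorite i t < favorite.length) ∨
        mcTraj favorite i t ∈ MF := by
  intro t
  induction t using Nat.strong_induction_on with
  | _ t ih =>
    intro hnm
    cases t with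
    | zero =>
      exact Or.inl ⟨by simp only [mcTraj_zero]; omega, by simp only [mcTraj_zero]; omega⟩
    | succ t' =>
      have hnm' : ∀ j < t', mcTraj favorite i j ∉ MF := fun j hj => hnm j (by omega)
      have hbt : -(favorite.length : Int) ≤ mcTraj favorite i t' ∧
          mcTraj favorite i t' < favorite.length :=
        (ih t' (by omega) hnm').resolve_right (hnm t' (by omega))
      have hmem : 0 ≤ mcTraj favorite i t' ∨ mcTraj favorite i t' ∈ favorite := by
        cases t' with
        | zero => exact Or.inl (by simp only [mcTraj_zero]; omega)
        | succ t'' =>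
          have hb'' : -(favorite.length : Int) ≤ mcTraj favorite i t'' ∧
              mcTraj favorite i t'' < favorite.length :=
            (ih t'' (by omega) (fun j hj => hnm j (by omega))).resolve_right
              (hnm t'' (by omega))
          refine Or.inr ?_
          rw [mcTraj_succ]
          unfold mcStep
          exact PySem.List.pyGetD_mem favorite 0
            (by simp only [PySem.Raise.InRange]; omega)
      rw [mcTraj_succ]
      exact mcStep_range MF favorite hPre (mcTraj favorite i t') hbt.1 hbt.2
        (hnm t' (by omega)) hmem

lemma mcReaches_unique (MF favorite : List Int) (i : Int) (k k' : Nat)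
    (h : mcReaches MF favorite i k) (h' : mcReaches MF favorite i k') : k = k' := by
  rcases Nat.lt_trichotomy k k' with hlt | heq | hgt
  · exact absurd h.1 (h'.2 k hlt)
  · exact heq
  · exact absurd h'.1 (h.2 k' hgt)

lemma mcMatches_unique (MF favorite : List Int) (i : Int) (r r' : Option (Int × Int))
    (h : mcMatches MF favorite i r) (h' : mcMatches MF favorite i r') : r = r' := by
  match r, r' with
  | none, none => rfl
  | none, some md => exact absurd (h'.choose_spec.2.1).1 (h _)
  | some md, none => exact absurd (h.choose_spec.2.1).1 (h' _)
  | some md, some md' =>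
    obtain ⟨k, hd, hr, hm⟩ := h
    obtain ⟨k', hd', hr', hm'⟩ := h'
    have hk : k = k' := mcReaches_unique MF favorite i k k' hr hr'
    subst hk
    have : md = md' := Prod.ext (hm.trans hm'.symm) (hd.trans hd'.symm)
    rw [this]

lemma mcDead_of_repeat (MF favorite : List Int) (i : Int) (a b : Nat) (hab : a < b)
    (heq : mcTraj favorite i a = mcTraj favorite i b)
    (hnm : ∀ j < b, mcTraj favorite i j ∉ MF) : mcDead MF favorite i := by
  have hshift : ∀ s, mcTraj favorite i (b + s) = mcTraj favorite i (a + s) := by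
    intro s
    rw [← mcTraj_add, ← mcTraj_add, heq]
  have key : ∀ k, ∃ j < b, mcTraj favorite i k = mcTraj favorite i j := by
    intro k
    induction k using Nat.strong_induction_on with
    | _ k ih =>
      by_cases hk : k < b
      · exact ⟨k, hk, rfl⟩
      · have hs : k = b + (k - b) := by omega
        have h1 : mcTraj favorite i k = mcTraj favorite i (a + (k - b)) := by
          calc mcTraj favorite i k = mcTraj favorite i (b + (k - b)) := by rw [← hs]
            _ = mcTraj favorite i (a + (k - b)) := hshift _
        have hlt : a + (k - b) < k := by omega
        obtain ⟨j, hj, hje⟩ := ih _ hlt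
        exact ⟨j, hj, h1.trans hje⟩
  intro k hmem
  obtain ⟨j, hj, hje⟩ := key k
  exact hnm j hj (hje ▸ hmem)

lemma mcDead_shift (MF favorite : List Int) (i : Int) (p : Nat)
    (h : mcDead MF favorite i) : mcDead MF favorite (mcTraj favorite i p) := by
  intro k
  rw [mcTraj_add]
  exact h _

lemma mcDead_of_tail (MF favorite : List Int) (i : Int) (k : Nat)
    (hnm : ∀ j < k, mcTraj favorite i j ∉ MF)
    (h : mcDead MF favorite (mcTraj favorite i k)) : mcDead MF favorite i := by
  intro s
  by_cases hs : s < k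
  · exact hnm s hs
  · have : s = k + (s - k) := by omega
    rw [this, ← mcTraj_add]
    exact h _

lemma mcReaches_extend (MF favorite : List Int) (i : Int) (p k k0 : Nat) (hpk : p ≤ k)
    (hnm : ∀ j < k, mcTraj favorite i j ∉ MF)
    (hr : mcReaches MF favorite (mcTraj favorite i k) k0) :
    mcReaches MF favorite (mcTraj favorite i p) (k - p + k0) ∧
      mcTraj favorite (mcTraj favorite i p) (k - p + k0) = mcTraj favorite (mcTraj favorite i k) k0 := by
  have heq : mcTraj favorite (mcTraj favorite i p) (k - p + k0) = mcTraj favorite (mcTraj favorite i k) k0 := by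
    rw [mcTraj_add, mcTraj_add]
    congr 1
    omega
  refine ⟨⟨heq ▸ hr.1, ?_⟩, heq⟩
  intro j hj
  rw [mcTraj_add]
  by_cases hjk : p + j < k
  · exact hnm _ hjk
  · have : p + j = k + (p + j - k) := by omega
    rw [this, ← mcTraj_add]
    exact hr.2 _ (by omega)

-- a duplicate-free list of integers drawn from [-n, n) has at most 2n elements
lemma mc_length_le (n : Nat) (l : List Int) (hnd : l.Nodup)
    (hmem : ∀ x ∈ l, -(n : Int) ≤ x ∧ x < n) : l.length ≤ 2 * n := by
  have hsub : l.toFinset ⊆ Finset.Ico (-(n : Int)) n := by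
    intro x hx
    rw [List.mem_toFinset] at hx
    rw [Finset.mem_Ico]
    exact hmem x hx
  have hcard := Finset.card_le_card hsub
  rw [List.toFinset_card_of_nodup hnd] at hcard
  rw [Int.card_Ico] at hcard
  omega

lemma walkA_go (MF favorite : List Int) (lc : PySem.Dict Int Int)
    (hlc : ∀ v, lc.contains v = true ↔ v ∈ MF)
    (hPre : Pre_sumAllMutualChains MF favorite)
    (i : Int) (hi0 : 0 ≤ i) (hin : i < favorite.length) :
    ∀ (fuel t : Nat),
      (∀ j < t, mcTraj favorite i j ∉ MF) →
      ((List.range t).map (mcTraj favorite i)).Nodup →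
      2 * favorite.length + 2 ≤ fuel + t →
      (∃ k, mcReaches MF favorite i k ∧
        walkA favorite lc fuel ((List.range t).map (mcTraj favorite i)) (mcTraj favorite i t)
          = ((List.range k).map (mcTraj favorite i), mcTraj favorite i k))
      ∨ (mcDead MF favorite i ∧
        lc.contains (walkA favorite lc fuel ((List.range t).map (mcTraj favorite i))
          (mcTraj favorite i t)).2 = false) := by
  intro fuel
  induction fuel with
  | zero =>
    intro t h1 h2 h3
    exfalso
    have hmem : ∀ x ∈ (List.range t).map (mcTraj favorite i),
        -(favorite.length : Int) ≤ x ∧ x < favorite.length := by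
      intro x hx
      obtain ⟨j, hj, rfl⟩ := List.mem_map.mp hx
      rw [List.mem_range] at hj
      exact (mcTraj_range' MF favorite hPre i hi0 hin j
        (fun j' hj' => h1 j' (by omega))).resolve_right (h1 j hj)
    have hle := mc_length_le favorite.length _ h2 hmem
    simp only [List.length_map, List.length_range] at hle
    omega
  | succ f ih =>
    intro t h1 h2 h3
    by_cases hMut : mcTraj favorite i t ∈ MF
    · left
      refine ⟨t, ⟨hMut, h1⟩, ?_⟩
      simp only [walkA]
      rw [if_neg]
      intro hcond
      rw [(hlc _).mpr hMut] at hcond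
      exact absurd hcond.2 (by simp)
    · have hlcf : lc.contains (mcTraj favorite i t) = false := by
        cases h : lc.contains (mcTraj favorite i t)
        · rfl
        · exact absurd ((hlc _).mp h) hMut
      by_cases hMem : mcTraj favorite i t ∈ (List.range t).map (mcTraj favorite i)
      · right
        obtain ⟨j, hj, hje⟩ : ∃ j < t, mcTraj favorite i j = mcTraj favorite i t := by
          simpa using hMem
        have hstop : walkA favorite lc (f+1) ((List.range t).map (mcTraj favorite i))
            (mcTraj favorite i t)
            = ((List.range t).map (mcTraj favorite i), mcTraj favorite i t) := by
          simp only [walkA]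
          rw [if_neg]
          intro hcond
          rw [List.contains_iff_mem.mpr hMem] at hcond
          exact absurd hcond.1 (by simp)
        refine ⟨mcDead_of_repeat MF favorite i j t hj hje h1, ?_⟩
        rw [hstop]
        exact hlcf
      · have hvisc : ((List.range t).map (mcTraj favorite i)).contains (mcTraj favorite i t)
            = false := by
          cases h : ((List.range t).map (mcTraj favorite i)).contains (mcTraj favorite i t)
          · rfl
          · exact absurd (List.contains_iff_mem.mp h) hMem
        have happ : (List.range t).map (mcTraj favorite i) ++ [mcTraj favorite i t]
            = (List.range (t+1)).map (mcTraj favorite i) := by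
          rw [List.range_succ, List.map_append]
          rfl
        have hnext : PySem.List.pyGetD favorite (mcTraj favorite i t) 0
            = mcTraj favorite i (t+1) := (mcTraj_succ favorite i t).symm
        have h1' : ∀ j < t + 1, mcTraj favorite i j ∉ MF := by
          intro j hj
          rcases Nat.lt_succ_iff_lt_or_eq.mp hj with h | h
          · exact h1 j h
          · subst h; exact hMut
        have h2' : ((List.range (t+1)).map (mcTraj favorite i)).Nodup := by
          rw [← happ]
          refine List.Nodup.append h2 (List.nodup_singleton _) ?_
          intro x hx hx'
          rw [List.mem_singleton] at hx'
          subst hx'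
          exact hMem hx
        have hrec := ih (t+1) h1' h2' (by omega)
        simp only [walkA]
        rw [if_pos ⟨hvisc, hlcf⟩, happ, hnext]
        exact hrec

lemma walkB_go (MF favorite : List Int) (memo : PySem.Dict Int (Option (Int × Int)))
    (mset : PySem.Set Int) (hms : ∀ v, PySem.Set.contains mset v = true ↔ v ∈ MF)
    (hPre : Pre_sumAllMutualChains MF favorite)
    (i : Int) (hi0 : 0 ≤ i) (hin : i < favorite.length) :
    ∀ (fuel t : Nat) (onPath : PySem.Set Int),
      (∀ j < t, mcTraj favorite i j ∉ MF ∧ memo.contains (mcTraj favorite i j) = false) →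
      ((List.range t).map (mcTraj favorite i)).Nodup →
      (∀ x, PySem.Set.contains onPath x = true ↔ ∃ j < t, x = mcTraj favorite i j) →
      2 * favorite.length + 2 ≤ fuel + t →
      ∃ k, t ≤ k ∧
        walkB favorite memo mset fuel ((List.range t).map (mcTraj favorite i)) onPath
            (mcTraj favorite i t)
          = ((List.range k).map (mcTraj favorite i), mcTraj favorite i k) ∧
        (∀ j < k, mcTraj favorite i j ∉ MF ∧ memo.contains (mcTraj favorite i j) = false) ∧
        ((List.range k).map (mcTraj favorite i)).Nodup ∧
        (memo.contains (mcTraj favorite i k) = true ∨ mcTraj favorite i k ∈ MF ∨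
          ∃ j < k, mcTraj favorite i k = mcTraj favorite i j) := by
  intro fuel
  induction fuel with
  | zero =>
    intro t onPath h1 h2 hop h3
    exfalso
    have hmem : ∀ x ∈ (List.range t).map (mcTraj favorite i),
        -(favorite.length : Int) ≤ x ∧ x < favorite.length := by
      intro x hx
      obtain ⟨j, hj, rfl⟩ := List.mem_map.mp hx
      rw [List.mem_range] at hj
      exact (mcTraj_range' MF favorite hPre i hi0 hin j
        (fun j' hj' => (h1 j' (by omega)).1)).resolve_right (h1 j hj).1
    have hle := mc_length_le favorite.length _ h2 hmem
    simp only [List.length_map, List.length_range] at hle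
    omega
  | succ f ih =>
    intro t onPath h1 h2 hop h3
    by_cases hstop : memo.contains (mcTraj favorite i t) = true ∨ mcTraj favorite i t ∈ MF ∨
        ∃ j < t, mcTraj favorite i t = mcTraj favorite i j
    · refine ⟨t, Nat.le_refl t, ?_, h1, h2, hstop⟩
      simp only [walkB]
      rw [if_neg]
      intro hcond
      rcases hstop with h | h | h
      · rw [h] at hcond; exact absurd hcond.1 (by simp)
      · rw [(hms _).mpr h] at hcond; exact absurd hcond.2.1 (by simp)
      · have hc : PySem.Set.contains onPath (mcTraj favorite i t) = true := by
          rw [hop]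
          obtain ⟨j, hj, hje⟩ := h
          exact ⟨j, hj, hje⟩
        rw [hc] at hcond; exact absurd hcond.2.2 (by simp)
    · push Not at hstop
      obtain ⟨hm1, hm2, hm3⟩ := hstop
      have hmemf : memo.contains (mcTraj favorite i t) = false := by
        cases h : memo.contains (mcTraj favorite i t)
        · rfl
        · exact absurd h hm1
      have hmsf : PySem.Set.contains mset (mcTraj favorite i t) = false := by
        cases h : PySem.Set.contains mset (mcTraj favorite i t)
        · rfl
        · exact absurd ((hms _).mp h) hm2
      have hopf : PySem.Set.contains onPath (mcTraj favorite i t) = false := by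
        cases h : PySem.Set.contains onPath (mcTraj favorite i t)
        · rfl
        · obtain ⟨j, hj, hje⟩ := (hop _).mp h
          exact absurd hje (hm3 j hj)
      have hMem : mcTraj favorite i t ∉ (List.range t).map (mcTraj favorite i) := by
        intro hx
        obtain ⟨j, hj, hje⟩ := List.mem_map.mp hx
        rw [List.mem_range] at hj
        exact hm3 j hj hje.symm
      have happ : (List.range t).map (mcTraj favorite i) ++ [mcTraj favorite i t]
          = (List.range (t+1)).map (mcTraj favorite i) := by
        rw [List.range_succ, List.map_append]
        rfl
      have hnext : PySem.List.pyGetD favorite (mcTraj favorite i t) 0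
          = mcTraj favorite i (t+1) := (mcTraj_succ favorite i t).symm
      have h1' : ∀ j < t + 1, mcTraj favorite i j ∉ MF ∧
          memo.contains (mcTraj favorite i j) = false := by
        intro j hj
        rcases Nat.lt_succ_iff_lt_or_eq.mp hj with h | h
        · exact h1 j h
        · subst h; exact ⟨hm2, hmemf⟩
      have h2' : ((List.range (t+1)).map (mcTraj favorite i)).Nodup := by
        rw [← happ]
        refine List.Nodup.append h2 (List.nodup_singleton _) ?_
        intro x hx hx'
        rw [List.mem_singleton] at hx'
        subst hx'
        exact hMem hx
      have hop' : ∀ x, PySem.Set.contains (PySem.Set.add onPath (mcTraj favorite i t)) x = true ↔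
          ∃ j < t + 1, x = mcTraj favorite i j := by
        intro x
        rw [PySem.Set.contains_iff, PySem.Set.mem_add, ← PySem.Set.contains_iff, hop]
        constructor
        · rintro (⟨j, hj, hje⟩ | h)
          · exact ⟨j, by omega, hje⟩
          · exact ⟨t, by omega, h⟩
        · rintro ⟨j, hj, hje⟩
          rcases Nat.lt_succ_iff_lt_or_eq.mp hj with h | h
          · exact Or.inl ⟨j, h, hje⟩
          · subst h; exact Or.inr hje
      obtain ⟨k, hk, hrest⟩ := ih (t+1) (PySem.Set.add onPath (mcTraj favorite i t)) h1' h2' hop' (by omega)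
      refine ⟨k, by omega, ?_⟩
      simp only [walkB]
      rw [if_pos ⟨hmemf, hmsf, hopf⟩, happ, hnext]
      exact hrest

-- the memo invariant: unique keys, every entry means what mcMatches says
def mcInv (MF favorite : List Int) (memo : PySem.Dict Int (Option (Int × Int))) : Prop :=
  memo.keys.Nodup ∧ ∀ v r, memo.get? v = some r → mcMatches MF favorite v r

lemma mcInv_foldl_none (MF favorite : List Int) (l : List Int) :
    ∀ (memo : PySem.Dict Int (Option (Int × Int))), mcInv MF favorite memo →
      (∀ u ∈ l, mcDead MF favorite u) →
      mcInv MF favorite (l.foldl (fun (m : PySem.Dict Int (Option (Int × Int))) u => m.insert u none) memo) ∧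
      (∀ v, memo.contains v = true ∨ v ∈ l →
        (l.foldl (fun (m : PySem.Dict Int (Option (Int × Int))) u => m.insert u none) memo).contains v = true) := by
  induction l with
  | nil =>
    intro memo hInv _
    refine ⟨hInv, ?_⟩
    intro v hv
    rcases hv with h | h
    · exact h
    · cases h
  | cons u l' ih =>
    intro memo hInv hdead
    have hInv' : mcInv MF favorite (memo.insert u none) := by
      refine ⟨PySem.Dict.nodup_keys_insert _ _ _ hInv.1, ?_⟩
      intro v r hget
      rw [PySem.Dict.get?_insert] at hget
      split at hget
      · rename_i hvu
        subst hvu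
        cases hget
        exact hdead _ List.mem_cons_self
      · exact hInv.2 v r hget
    have hdead' : ∀ x ∈ l', mcDead MF favorite x := fun x hx => hdead x (List.mem_cons_of_mem _ hx)
    obtain ⟨ih1, ih2⟩ := ih (memo.insert u none) hInv' hdead'
    refine ⟨ih1, ?_⟩
    intro v hv
    simp only [List.foldl_cons]
    rcases hv with h | h
    · exact ih2 v (Or.inl (by rw [PySem.Dict.contains_insert, h, Bool.or_true]))
    · rcases List.mem_cons.mp h with h | h
      · subst h
        exact ih2 v (Or.inl (by rw [PySem.Dict.contains_insert]; simp))
      · exact ih2 v (Or.inr h)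

lemma mcInv_backfill (MF favorite : List Int) (m0 : Int) (ys : List Int) :
    ∀ (memo : PySem.Dict Int (Option (Int × Int))) (d0 : Int), mcInv MF favorite memo →
      (∀ (j : Nat) (hj : j < ys.length), mcMatches MF favorite ys[j] (some (m0, d0 + 1 + j))) →
      mcInv MF favorite
        ((ys.foldl (fun (st : PySem.Dict Int (Option (Int × Int)) × Int) u =>
          (st.1.insert u (some (m0, st.2 + 1)), st.2 + 1)) (memo, d0)).1) ∧
      (∀ v, memo.contains v = true ∨ v ∈ ys →
        ((ys.foldl (fun (st : PySem.Dict Int (Option (Int × Int)) × Int) u =>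
          (st.1.insert u (some (m0, st.2 + 1)), st.2 + 1)) (memo, d0)).1).contains v = true) := by
  induction ys with
  | nil =>
    intro memo d0 hInv _
    refine ⟨hInv, ?_⟩
    intro v hv
    rcases hv with h | h
    · exact h
    · cases h
  | cons y ys' ih =>
    intro memo d0 hInv hmatch
    have hy : mcMatches MF favorite y (some (m0, d0 + 1)) := by
      have := hmatch 0 (by simp)
      simpa using this
    have hInv' : mcInv MF favorite (memo.insert y (some (m0, d0 + 1))) := by
      refine ⟨PySem.Dict.nodup_keys_insert _ _ _ hInv.1, ?_⟩
      intro v r hget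
      rw [PySem.Dict.get?_insert] at hget
      split at hget
      · rename_i hvy
        subst hvy
        cases hget
        exact hy
      · exact hInv.2 v r hget
    have hmatch' : ∀ (j : Nat) (hj : j < ys'.length),
        mcMatches MF favorite ys'[j] (some (m0, d0 + 1 + 1 + (j : Int))) := by
      intro j hj
      have h2 := hmatch (j+1) (by simpa using Nat.succ_lt_succ hj)
      have harith : d0 + 1 + ((j : Int) + 1) = d0 + 1 + 1 + (j : Int) := by ring
      simp only [List.getElem_cons_succ] at h2
      push_cast at h2
      rw [harith] at h2
      exact h2
    obtain ⟨ih1, ih2⟩ := ih (memo.insert y (some (m0, d0 + 1))) (d0 + 1) hInv' hmatch'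
    refine ⟨ih1, ?_⟩
    intro v hv
    simp only [List.foldl_cons]
    rcases hv with h | h
    · exact ih2 v (Or.inl (by rw [PySem.Dict.contains_insert, h, Bool.or_true]))
    · rcases List.mem_cons.mp h with h | h
      · subst h
        exact ih2 v (Or.inl (by rw [PySem.Dict.contains_insert]; simp))
      · exact ih2 v (Or.inr h)

-- one iteration of B's memo-building loop keeps the invariant, resolves i, keeps old keys
lemma memo_step_core (MF favorite : List Int) (mset : PySem.Set Int)
    (hms : ∀ v, PySem.Set.contains mset v = true ↔ v ∈ MF)
    (memo : PySem.Dict Int (Option (Int × Int))) (hInv : mcInv MF favorite memo)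
    (i : Int) (k : Nat)
    (hnm : ∀ j < k, mcTraj favorite i j ∉ MF ∧ memo.contains (mcTraj favorite i j) = false)
    (hstop : memo.contains (mcTraj favorite i k) = true ∨ mcTraj favorite i k ∈ MF ∨
      ∃ j < k, mcTraj favorite i k = mcTraj favorite i j)
    (memoNext : PySem.Dict Int (Option (Int × Int)))
    (hnext : memoNext =
      (match (if PySem.Set.contains mset (mcTraj favorite i k) = true then
            memo.insert (mcTraj favorite i k) (some (mcTraj favorite i k, 0)) else memo).getD
          (mcTraj favorite i k) none with
        | none => ((List.range k).map (mcTraj favorite i)).foldl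
            (fun (m : PySem.Dict Int (Option (Int × Int))) u => m.insert u none)
            (if PySem.Set.contains mset (mcTraj favorite i k) = true then
              memo.insert (mcTraj favorite i k) (some (mcTraj favorite i k, 0)) else memo)
        | some md => (((List.range k).map (mcTraj favorite i)).reverse.foldl
            (fun (st : PySem.Dict Int (Option (Int × Int)) × Int) u =>
              (st.1.insert u (some (md.1, st.2 + 1)), st.2 + 1))
            ((if PySem.Set.contains mset (mcTraj favorite i k) = true then
              memo.insert (mcTraj favorite i k) (some (mcTraj favorite i k, 0)) else memo),
              md.2)).1)) :
    mcInv MF favorite memoNext ∧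
    (∀ v', memo.contains v' = true → memoNext.contains v' = true) ∧
    memoNext.contains i = true := by
  have hpathlen : ((List.range k).map (mcTraj favorite i)).length = k := by simp
  have hpathget : ∀ (p : Nat) (hp : p < k),
      ((List.range k).map (mcTraj favorite i))[p]'(by simpa using hp) = mcTraj favorite i p := by
    intro p hp
    simp
  have hrevget : ∀ (j : Nat) (hj : j < k),
      ((List.range k).map (mcTraj favorite i)).reverse[j]'(by simpa using hj)
        = mcTraj favorite i (k - 1 - j) := by
    intro j hj
    rw [List.getElem_reverse]
    simp only [hpathlen]
    exact hpathget _ (by omega)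
  have hipath : k ≠ 0 → i ∈ (List.range k).map (mcTraj favorite i) := by
    intro hk
    exact List.mem_map.mpr ⟨0, List.mem_range.mpr (by omega), mcTraj_zero favorite i⟩
  by_cases hMut : mcTraj favorite i k ∈ MF
  · -- walk stopped on a mutual favorite: seed it, then back-fill the path
    have hc : PySem.Set.contains mset (mcTraj favorite i k) = true := (hms _).mpr hMut
    rw [if_pos hc, PySem.Dict.getD_insert_self] at hnext
    have hInv1 : mcInv MF favorite
        (memo.insert (mcTraj favorite i k) (some (mcTraj favorite i k, 0))) := by
      refine ⟨PySem.Dict.nodup_keys_insert _ _ _ hInv.1, ?_⟩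
      intro v r hget
      rw [PySem.Dict.get?_insert] at hget
      split at hget
      · rename_i hvk
        cases hget
        subst hvk
        exact ⟨0, by simp, ⟨by rw [mcTraj_zero]; exact hMut, fun j hj => absurd hj (Nat.not_lt_zero j)⟩,
          (mcTraj_zero _ _).symm⟩
      · exact hInv.2 v r hget
    have hmatch : ∀ (j : Nat) (hj : j < ((List.range k).map (mcTraj favorite i)).reverse.length),
        mcMatches MF favorite (((List.range k).map (mcTraj favorite i)).reverse[j])
          (some (mcTraj favorite i k, (0 : Int) + 1 + (j : Int))) := by
      intro j hj
      have hjk : j < k := by simpa using hj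
      rw [hrevget j hjk]
      have hr0 : mcReaches MF favorite (mcTraj favorite i k) 0 :=
        ⟨by rw [mcTraj_zero]; exact hMut, fun j hj => absurd hj (Nat.not_lt_zero j)⟩
      obtain ⟨hre, hve⟩ := mcReaches_extend MF favorite i (k - 1 - j) k 0 (by omega)
        (fun j' hj' => (hnm j' hj').1) hr0
      refine ⟨k - (k - 1 - j) + 0, by push_cast; omega, hre, ?_⟩
      rw [hve, mcTraj_zero]
    obtain ⟨hI, hC⟩ := mcInv_backfill MF favorite (mcTraj favorite i k)
      ((List.range k).map (mcTraj favorite i)).reverse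
      (memo.insert (mcTraj favorite i k) (some (mcTraj favorite i k, 0))) 0 hInv1 hmatch
    subst hnext
    refine ⟨hI, ?_, ?_⟩
    · intro v' hv'
      exact hC v' (Or.inl (by rw [PySem.Dict.contains_insert, hv', Bool.or_true]))
    · by_cases hk : k = 0
      · subst hk
        refine hC i (Or.inl ?_)
        rw [← mcTraj_zero favorite i, PySem.Dict.contains_insert]
        simp [mcTraj_zero]
      · exact hC i (Or.inr (List.mem_reverse.mpr (hipath hk)))
  · -- walk stopped on a memoized node or closed a mutual-free cycle
    have hc : PySem.Set.contains mset (mcTraj favorite i k) = false := by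
      cases h : PySem.Set.contains mset (mcTraj favorite i k)
      · rfl
      · exact absurd ((hms _).mp h) hMut
    have hcn : ¬ PySem.Set.contains mset (mcTraj favorite i k) = true := by rw [hc]; exact Bool.false_ne_true
    rw [if_neg hcn] at hnext
    by_cases hvc : memo.contains (mcTraj favorite i k) = true
    · -- stopped on a memoized node: reuse its result
      have hsome : (memo.get? (mcTraj favorite i k)).isSome = true := by
        rw [← PySem.Dict.contains_eq_isSome_get? memo (mcTraj favorite i k)]
        exact hvc
      obtain ⟨r, hr⟩ := Option.isSome_iff_exists.mp hsome
      have hgd : memo.getD (mcTraj favorite i k) none = r := by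
        rw [PySem.Dict.getD_eq_get?_getD, hr]; rfl
      have hM : mcMatches MF favorite (mcTraj favorite i k) r := hInv.2 _ r hr
      rw [hgd] at hnext
      cases r with
      | none =>
        have hDead : mcDead MF favorite i :=
          mcDead_of_tail MF favorite i k (fun j hj => (hnm j hj).1) hM
        have hdeadall : ∀ u ∈ (List.range k).map (mcTraj favorite i), mcDead MF favorite u := by
          intro u hu
          obtain ⟨p, hp, rfl⟩ := List.mem_map.mp hu
          exact mcDead_shift MF favorite i p hDead
        obtain ⟨hI, hC⟩ := mcInv_foldl_none MF favorite ((List.range k).map (mcTraj favorite i))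
          memo hInv hdeadall
        subst hnext
        refine ⟨hI, fun v' hv' => hC v' (Or.inl hv'), ?_⟩
        by_cases hk : k = 0
        · subst hk
          refine hC i (Or.inl ?_)
          rw [← mcTraj_zero favorite i]
          exact hvc
        · exact hC i (Or.inr (hipath hk))
      | some md =>
        obtain ⟨k0, hd0, hr0, hm0⟩ := hM
        have hmatch : ∀ (j : Nat) (hj : j < ((List.range k).map (mcTraj favorite i)).reverse.length),
            mcMatches MF favorite (((List.range k).map (mcTraj favorite i)).reverse[j])
              (some (md.1, md.2 + 1 + (j : Int))) := by
          intro j hj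
          have hjk : j < k := by simpa using hj
          rw [hrevget j hjk]
          obtain ⟨hre, hve⟩ := mcReaches_extend MF favorite i (k - 1 - j) k k0 (by omega)
            (fun j' hj' => (hnm j' hj').1) hr0
          refine ⟨k - (k - 1 - j) + k0, by rw [hd0]; push_cast; omega, hre, ?_⟩
          rw [hve, hm0]
        obtain ⟨hI, hC⟩ := mcInv_backfill MF favorite md.1
          ((List.range k).map (mcTraj favorite i)).reverse memo md.2 hInv hmatch
        subst hnext
        refine ⟨hI, fun v' hv' => hC v' (Or.inl hv'), ?_⟩
        by_cases hk : k = 0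
        · subst hk
          refine hC i (Or.inl ?_)
          rw [← mcTraj_zero favorite i]
          exact hvc
        · exact hC i (Or.inr (List.mem_reverse.mpr (hipath hk)))
    · -- the walk closed a cycle containing no mutual favorite: the whole path is dead
      have hvcf : memo.contains (mcTraj favorite i k) = false := by
        cases h : memo.contains (mcTraj favorite i k)
        · rfl
        · exact absurd h hvc
      have hgd : memo.getD (mcTraj favorite i k) none = none :=
        PySem.Dict.getD_of_not_contains memo none hvcf
      rw [hgd] at hnext
      rcases hstop with h | h | h
      · exact absurd h hvc
      · exact absurd h hMut
      · obtain ⟨j, hj, hje⟩ := h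
        have hDead : mcDead MF favorite i :=
          mcDead_of_repeat MF favorite i j k hj hje.symm (fun j' hj' => (hnm j' hj').1)
        have hdeadall : ∀ u ∈ (List.range k).map (mcTraj favorite i), mcDead MF favorite u := by
          intro u hu
          obtain ⟨p, hp, rfl⟩ := List.mem_map.mp hu
          exact mcDead_shift MF favorite i p hDead
        obtain ⟨hI, hC⟩ := mcInv_foldl_none MF favorite ((List.range k).map (mcTraj favorite i))
          memo hInv hdeadall
        subst hnext
        refine ⟨hI, fun v' hv' => hC v' (Or.inl hv'), ?_⟩
        exact hC i (Or.inr (hipath (by omega)))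

-- one iteration of B's memo-building loop keeps the invariant, resolves i, keeps old keys
lemma memo_step (MF favorite : List Int) (mset : PySem.Set Int)
    (hms : ∀ v, PySem.Set.contains mset v = true ↔ v ∈ MF)
    (hPre : Pre_sumAllMutualChains MF favorite)
    (memo : PySem.Dict Int (Option (Int × Int))) (hInv : mcInv MF favorite memo)
    (i : Nat) (hin : i < favorite.length) :
    mcInv MF favorite
      ((fun (memo : PySem.Dict Int (Option (Int × Int))) (i : Nat) =>
        let w := walkB favorite memo mset (2 * favorite.length + 2) [] PySem.Set.empty (i : Int)
        let memo1 := if PySem.Set.contains mset w.2 then memo.insert w.2 (some (w.2, 0)) else memo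
        match memo1.getD w.2 none with
        | none => w.1.foldl (fun (m : PySem.Dict Int (Option (Int × Int))) u => m.insert u none) memo1
        | some md =>
            (w.1.reverse.foldl (fun (st : PySem.Dict Int (Option (Int × Int)) × Int) u =>
              (st.1.insert u (some (md.1, st.2 + 1)), st.2 + 1)) (memo1, md.2)).1) memo i) ∧
    (∀ v, memo.contains v = true →
      ((fun (memo : PySem.Dict Int (Option (Int × Int))) (i : Nat) =>
        let w := walkB favorite memo mset (2 * favorite.length + 2) [] PySem.Set.empty (i : Int)
        let memo1 := if PySem.Set.contains mset w.2 then memo.insert w.2 (some (w.2, 0)) else memo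
        match memo1.getD w.2 none with
        | none => w.1.foldl (fun (m : PySem.Dict Int (Option (Int × Int))) u => m.insert u none) memo1
        | some md =>
            (w.1.reverse.foldl (fun (st : PySem.Dict Int (Option (Int × Int)) × Int) u =>
              (st.1.insert u (some (md.1, st.2 + 1)), st.2 + 1)) (memo1, md.2)).1) memo i).contains v = true) ∧
    ((fun (memo : PySem.Dict Int (Option (Int × Int))) (i : Nat) =>
        let w := walkB favorite memo mset (2 * favorite.length + 2) [] PySem.Set.empty (i : Int)
        let memo1 := if PySem.Set.contains mset w.2 then memo.insert w.2 (some (w.2, 0)) else memo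
        match memo1.getD w.2 none with
        | none => w.1.foldl (fun (m : PySem.Dict Int (Option (Int × Int))) u => m.insert u none) memo1
        | some md =>
            (w.1.reverse.foldl (fun (st : PySem.Dict Int (Option (Int × Int)) × Int) u =>
              (st.1.insert u (some (md.1, st.2 + 1)), st.2 + 1)) (memo1, md.2)).1) memo i).contains (i : Int) = true := by
  have hi0 : (0 : Int) ≤ (i : Int) := Int.natCast_nonneg i
  have hin' : (i : Int) < favorite.length := by exact_mod_cast hin
  have hop : ∀ x, PySem.Set.contains PySem.Set.empty x = true ↔
      ∃ j < 0, x = mcTraj favorite (i : Int) j := by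
    intro x
    constructor
    · intro h
      exact absurd h (by simp [PySem.Set.empty, PySem.Set.contains])
    · rintro ⟨j, hj, -⟩
      omega
  obtain ⟨k, -, hw, hnm, hnd, hstop⟩ := walkB_go MF favorite memo mset hms hPre (i : Int) hi0 hin'
    (2 * favorite.length + 2) 0 PySem.Set.empty
    (fun j hj => absurd hj (Nat.not_lt_zero j)) (by simp) hop (by omega)
  simp only [List.range_zero, List.map_nil, mcTraj_zero] at hw
  refine memo_step_core MF favorite mset hms memo hInv (i : Int) k hnm hstop _ ?_
  simp only [hw]

lemma memo_fold (MF favorite : List Int) (mset : PySem.Set Int)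
    (hms : ∀ v, PySem.Set.contains mset v = true ↔ v ∈ MF)
    (hPre : Pre_sumAllMutualChains MF favorite) :
    ∀ (l : List Nat), (∀ x ∈ l, x < favorite.length) →
      ∀ (memo : PySem.Dict Int (Option (Int × Int))), mcInv MF favorite memo →
      mcInv MF favorite (l.foldl (fun (memo : PySem.Dict Int (Option (Int × Int))) (i : Nat) =>
        let w := walkB favorite memo mset (2 * favorite.length + 2) [] PySem.Set.empty (i : Int)
        let memo1 := if PySem.Set.contains mset w.2 then memo.insert w.2 (some (w.2, 0)) else memo
        match memo1.getD w.2 none with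
        | none => w.1.foldl (fun (m : PySem.Dict Int (Option (Int × Int))) u => m.insert u none) memo1
        | some md =>
            (w.1.reverse.foldl (fun (st : PySem.Dict Int (Option (Int × Int)) × Int) u =>
              (st.1.insert u (some (md.1, st.2 + 1)), st.2 + 1)) (memo1, md.2)).1) memo) ∧
      (∀ v, memo.contains v = true ∨ (∃ x ∈ l, v = (x : Int)) →
        (l.foldl (fun (memo : PySem.Dict Int (Option (Int × Int))) (i : Nat) =>
        let w := walkB favorite memo mset (2 * favorite.length + 2) [] PySem.Set.empty (i : Int)
        let memo1 := if PySem.Set.contains mset w.2 then memo.insert w.2 (some (w.2, 0)) else memo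
        match memo1.getD w.2 none with
        | none => w.1.foldl (fun (m : PySem.Dict Int (Option (Int × Int))) u => m.insert u none) memo1
        | some md =>
            (w.1.reverse.foldl (fun (st : PySem.Dict Int (Option (Int × Int)) × Int) u =>
              (st.1.insert u (some (md.1, st.2 + 1)), st.2 + 1)) (memo1, md.2)).1) memo).contains v = true) := by
  intro l
  induction l with
  | nil =>
    intro _ memo hInv
    refine ⟨hInv, ?_⟩
    intro v hv
    rcases hv with h | ⟨x, hx, -⟩
    · exact h
    · cases hx
  | cons x l' ih =>
    intro hl memo hInv
    have hx : x < favorite.length := hl x List.mem_cons_self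
    obtain ⟨hI1, hC1, hCi⟩ := memo_step MF favorite mset hms hPre memo hInv x hx
    simp only [List.foldl_cons]
    obtain ⟨ihI, ihC⟩ := ih (fun y hy => hl y (List.mem_cons_of_mem _ hy)) _ hI1
    refine ⟨ihI, ?_⟩
    intro v hv
    rcases hv with h | ⟨y, hy, rfl⟩
    · exact ihC v (Or.inl (hC1 v h))
    · rcases List.mem_cons.mp hy with h | h
      · subst h
        exact ihC _ (Or.inl hCi)
      · exact ihC _ (Or.inr ⟨y, h, rfl⟩)

-- dictionaries built by inserting the constant 0: lookup-with-default-0 is 0 everywhere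
lemma getD_foldl_insert0 (xs : List Int) :
    ∀ (d : PySem.Dict Int Int), (∀ v, d.getD v 0 = 0) →
      ∀ v, (xs.foldl (fun d node => d.insert node 0) d).getD v 0 = 0 := by
  induction xs with
  | nil => intro d hd v; exact hd v
  | cons x xs' ih =>
    intro d hd v
    simp only [List.foldl_cons]
    refine ih _ ?_ v
    intro w
    rw [PySem.Dict.getD_insert]
    split
    · rfl
    · exact hd w

lemma contains_foldl_insert0 (xs : List Int) :
    ∀ (d : PySem.Dict Int Int) (v : Int),
      (xs.foldl (fun d node => d.insert node 0) d).contains v = true ↔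
        v ∈ xs ∨ d.contains v = true := by
  induction xs with
  | nil => intro d v; simp
  | cons x xs' ih =>
    intro d v
    simp only [List.foldl_cons]
    rw [ih]
    rw [PySem.Dict.contains_insert]
    constructor
    · rintro (h | h)
      · exact Or.inl (List.mem_cons_of_mem _ h)
      · rcases Bool.or_eq_true_iff.mp h with h | h
        · exact Or.inl (by rw [List.mem_cons]; exact Or.inl (by simpa using h))
        · exact Or.inr h
    · rintro (h | h)
      · rcases List.mem_cons.mp h with h | h
        · subst h; exact Or.inr (by simp)
        · exact Or.inl h
      · exact Or.inr (by rw [h, Bool.or_true])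

-- the two accumulation loops agree step by step, given the finished memo
lemma lc_fold_eq (MF favorite : List Int)
    (hPre : Pre_sumAllMutualChains MF favorite)
    (memo : PySem.Dict Int (Option (Int × Int)))
    (hmemo : ∀ (x : Nat), x < favorite.length →
      ∃ r, memo.getD (x : Int) none = r ∧ mcMatches MF favorite (x : Int) r) :
    ∀ (l : List Nat), (∀ x ∈ l, x < favorite.length) →
      ∀ (lc best : PySem.Dict Int Int),
      (∀ v, lc.contains v = true ↔ v ∈ MF) →
      (∀ v, lc.getD v 0 = best.getD v 0) →
      ∀ v,
        (l.foldl (fun (lc : PySem.Dict Int Int) (i : Nat) =>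
          let w := walkA favorite lc (2 * favorite.length + 2) [] (i : Int)
          if lc.contains w.2 then
            if (w.1.length : Int) + 1 > lc.getD w.2 0 then lc.insert w.2 ((w.1.length : Int) + 1)
            else lc
          else lc) lc).getD v 0
        = (l.foldl (fun (best : PySem.Dict Int Int) (i : Nat) =>
            match memo.getD (i : Int) none with
            | none => best
            | some md => if md.2 + 1 > best.getD md.1 0 then best.insert md.1 (md.2 + 1) else best)
            best).getD v 0 := by
  intro l
  induction l with
  | nil =>
    intro _ lc best hlc hgd v
    simpa using hgd v
  | cons x l' ih =>
    intro hl lc best hlc hgd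
    have hx : x < favorite.length := hl x List.mem_cons_self
    have hi0 : (0 : Int) ≤ (x : Int) := Int.natCast_nonneg x
    have hin' : (x : Int) < favorite.length := by exact_mod_cast hx
    have hl' : ∀ y ∈ l', y < favorite.length := fun y hy => hl y (List.mem_cons_of_mem _ hy)
    obtain ⟨r, hgdm, hMr⟩ := hmemo x hx
    simp only [List.foldl_cons]
    rcases walkA_go MF favorite lc hlc hPre (x : Int) hi0 hin' (2 * favorite.length + 2) 0
        (fun j hj => absurd hj (Nat.not_lt_zero j)) (by simp) (by omega) with
      ⟨k, hreach, hw⟩ | ⟨hdead, hcf⟩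
    · -- the walk from x reaches a mutual favorite after k steps
      simp only [List.range_zero, List.map_nil, mcTraj_zero] at hw
      have hrk : r = some (mcTraj favorite (x : Int) k, (k : Int)) :=
        mcMatches_unique MF favorite (x : Int) r _ hMr ⟨k, rfl, hreach, rfl⟩
      rw [hrk] at hgdm
      have hcontains : lc.contains (mcTraj favorite (x : Int) k) = true := (hlc _).mpr hreach.1
      have hlen : (((List.range k).map (mcTraj favorite (x : Int))).length : Int) = (k : Int) := by
        simp
      simp only [hw, hgdm, hcontains, if_true, hlen]
      rw [hgd (mcTraj favorite (x : Int) k)]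
      by_cases hcmp : (k : Int) + 1 > best.getD (mcTraj favorite (x : Int) k) 0
      · rw [if_pos hcmp, if_pos hcmp]
        refine ih hl' _ _ ?_ ?_
        · intro v
          rw [PySem.Dict.contains_insert]
          constructor
          · intro h
            rcases Bool.or_eq_true_iff.mp h with h | h
            · have : v = mcTraj favorite (x : Int) k := by simpa using h
              subst this
              exact hreach.1
            · exact (hlc v).mp h
          · intro h
            by_cases hv : v = mcTraj favorite (x : Int) k
            · subst hv; simp
            · rw [(hlc v).mpr h, Bool.or_true]
        · intro v
          rw [PySem.Dict.getD_insert, PySem.Dict.getD_insert]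
          split
          · rfl
          · exact hgd v
      · rw [if_neg hcmp, if_neg hcmp]
        exact ih hl' _ _ hlc hgd
    · -- the walk from x never reaches a mutual favorite: neither side updates
      have hrnone : r = none := by
        cases r with
        | none => rfl
        | some md =>
          obtain ⟨k0, -, hr0, -⟩ := hMr
          exact absurd hr0.1 (hdead k0)
      rw [hrnone] at hgdm
      simp only [List.range_zero, List.map_nil, mcTraj_zero] at hcf
      simp only [hgdm, hcf]
      exact ih hl' _ _ hlc hgd

-- ===== VERDICT (by name: the statement is the Claim_ definition above) =====
theorem sumAllMutualChains_spec : Claim_equal_sumAllMutualChains := by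
  intro MF favorite hDom hPre
  unfold Spec_sumAllMutualChains
  have hms : ∀ v, PySem.Set.contains (PySem.Set.ofList MF) v = true ↔ v ∈ MF := by
    intro v
    rw [PySem.Set.contains_iff, PySem.Set.mem_ofList]
  obtain ⟨hInvF, hCF⟩ := memo_fold MF favorite (PySem.Set.ofList MF) hms hPre
    (List.range favorite.length) (fun x hx => List.mem_range.mp hx)
    PySem.Dict.empty ⟨by simp [PySem.Dict.keys_empty], by intro v r h; rw [PySem.Dict.get?_empty] at h; cases h⟩
  have hmemo : ∀ (x : Nat), x < favorite.length →
      ∃ r, ((List.range favorite.length).foldl (fun (memo : PySem.Dict Int (Option (Int × Int))) (i : Nat) =>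
        let w := walkB favorite memo (PySem.Set.ofList MF) (2 * favorite.length + 2) [] PySem.Set.empty (i : Int)
        let memo1 := if PySem.Set.contains (PySem.Set.ofList MF) w.2 then memo.insert w.2 (some (w.2, 0)) else memo
        match memo1.getD w.2 none with
        | none => w.1.foldl (fun (m : PySem.Dict Int (Option (Int × Int))) u => m.insert u none) memo1
        | some md =>
            (w.1.reverse.foldl (fun (st : PySem.Dict Int (Option (Int × Int)) × Int) u =>
              (st.1.insert u (some (md.1, st.2 + 1)), st.2 + 1)) (memo1, md.2)).1) PySem.Dict.empty).getD (x : Int) none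
        = r ∧ mcMatches MF favorite (x : Int) r := by
    intro x hx
    have hc := hCF (x : Int) (Or.inr ⟨x, List.mem_range.mpr hx, rfl⟩)
    have hsome := (PySem.Dict.contains_eq_isSome_get? _ _).symm.trans hc
    obtain ⟨r, hr⟩ := Option.isSome_iff_exists.mp hsome
    refine ⟨r, ?_, hInvF.2 _ r hr⟩
    rw [PySem.Dict.getD_eq_get?_getD, hr]
    rfl
  have hlc0 : ∀ v, (MF.foldl (fun (d : PySem.Dict Int Int) node => d.insert node 0)
      PySem.Dict.empty).contains v = true ↔ v ∈ MF := by
    intro v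
    rw [contains_foldl_insert0]
    simp [PySem.Dict.contains_empty]
  have hbest0 : ∀ v, ((PySem.Set.ofList MF).foldl (fun (d : PySem.Dict Int Int) m => d.insert m 0)
      PySem.Dict.empty).getD v 0 = 0 :=
    getD_foldl_insert0 (PySem.Set.ofList MF) PySem.Dict.empty (fun v => by rw [PySem.Dict.getD_empty]) 
  have hgd0 : ∀ v, (MF.foldl (fun (d : PySem.Dict Int Int) node => d.insert node 0)
      PySem.Dict.empty).getD v 0 = ((PySem.Set.ofList MF).foldl (fun (d : PySem.Dict Int Int) m => d.insert m 0)
      PySem.Dict.empty).getD v 0 := by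
    intro v
    rw [getD_foldl_insert0 MF PySem.Dict.empty (fun v => by rw [PySem.Dict.getD_empty]) v, hbest0 v]
  have hpt := lc_fold_eq MF favorite hPre _ hmemo (List.range favorite.length)
    (fun x hx => List.mem_range.mp hx) _ _ hlc0 hgd0
  simp only [sumAllMutualChains, sumAllMutualChains_alt]
  have hfun : (fun (s : Int) (node : Int) => s + ((List.range favorite.length).foldl
        (fun (lc : PySem.Dict Int Int) (i : Nat) =>
          let w := walkA favorite lc (2 * favorite.length + 2) [] (i : Int)
          if lc.contains w.2 then
            if (w.1.length : Int) + 1 > lc.getD w.2 0 then lc.insert w.2 ((w.1.length : Int) + 1)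
            else lc
          else lc)
        (MF.foldl (fun (d : PySem.Dict Int Int) node => d.insert node 0) PySem.Dict.empty)).getD node 0)
      = (fun (s : Int) (node : Int) => s + ((List.range favorite.length).foldl
        (fun (best : PySem.Dict Int Int) (i : Nat) =>
          match ((List.range favorite.length).foldl (fun (memo : PySem.Dict Int (Option (Int × Int))) (i : Nat) =>
            let w := walkB favorite memo (PySem.Set.ofList MF) (2 * favorite.length + 2) [] PySem.Set.empty (i : Int)
            let memo1 := if PySem.Set.contains (PySem.Set.ofList MF) w.2 then memo.insert w.2 (some (w.2, 0)) else memo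
            match memo1.getD w.2 none with
            | none => w.1.foldl (fun (m : PySem.Dict Int (Option (Int × Int))) u => m.insert u none) memo1
            | some md =>
                (w.1.reverse.foldl (fun (st : PySem.Dict Int (Option (Int × Int)) × Int) u =>
                  (st.1.insert u (some (md.1, st.2 + 1)), st.2 + 1)) (memo1, md.2)).1) PySem.Dict.empty).getD (i : Int) none with
          | none => best
          | some md => if md.2 + 1 > best.getD md.1 0 then best.insert md.1 (md.2 + 1) else best)
        ((PySem.Set.ofList MF).foldl (fun (d : PySem.Dict Int Int) m => d.insert m 0) PySem.Dict.empty)).getD node 0) := by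
    funext s node
    rw [hpt node]
  rw [hfun]
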